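-- pv_equiv track=rewrite | github.com/KroegerP/advent-of-code-2023 | days/five/main.py | find_matching_tuples
-- ===== SOURCE A (Python) =====
-- def find_matching_tuples(tuple_list: list[tuple], current_numbers: list[int]):
--     found_pairs = current_numbers
--
--     source_mappings = [values[0] for values in tuple_list]
--     destination_mappings = [values[1] for values in tuple_list]
--
--     for index, cur_num in enumerate(current_numbers):
--         if cur_num in source_mappings:
--             num_index = source_mappings.index(cur_num)
--
--             mapped_value = destination_mappings[num_index]
--
--             found_pairs[index] = mapped_value
--
--     return found_pairs
-- ===== SOURCE B (Python) =====
-- def find_matching_tuples(tuple_list: list[tuple], current_numbers: list[int]):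
--     # Loop interchange: iterate over the tuples in REVERSE order and, for each
--     # (src, dst), overwrite every position whose ORIGINAL value equals src.
--     # Processing in reverse means the first tuple in tuple_list writes last,
--     # so first-tuple-wins exactly as A's .index lookup.  Mutates and returns
--     # current_numbers in place, like A.
--     original = list(current_numbers)
--     for src, dst in reversed(tuple_list):
--         for i, n in enumerate(original):
--             if n == src:
--                 current_numbers[i] = dst
--     return current_numbers
-- ===== Notes on version B (the rewrite author's own statement) =====
-- stated objective: alternative
-- what changed: B interchanges the loops: instead of scanning the source list (`in` + `.index`) for each number, it iterates the tuples in reverse order and overwrites every position whose original value equals the tuple's source, so the first tuple's destination is written last and wins without any index search.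
import Mathlib
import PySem

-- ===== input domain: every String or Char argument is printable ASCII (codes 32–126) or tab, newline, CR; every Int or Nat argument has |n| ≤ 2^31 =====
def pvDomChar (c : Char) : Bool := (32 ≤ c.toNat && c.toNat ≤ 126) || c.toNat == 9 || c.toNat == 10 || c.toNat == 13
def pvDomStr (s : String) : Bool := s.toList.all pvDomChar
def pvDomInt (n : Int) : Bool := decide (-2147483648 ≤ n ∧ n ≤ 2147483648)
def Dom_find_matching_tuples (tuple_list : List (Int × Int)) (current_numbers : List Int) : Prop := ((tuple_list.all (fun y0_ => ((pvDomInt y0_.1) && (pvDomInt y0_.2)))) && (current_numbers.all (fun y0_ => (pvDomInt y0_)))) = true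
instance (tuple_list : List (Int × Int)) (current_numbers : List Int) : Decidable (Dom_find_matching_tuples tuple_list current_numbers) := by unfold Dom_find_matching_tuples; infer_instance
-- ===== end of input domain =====

-- B interchanges A's loops: it walks the tuples in reverse order and overwrites every
-- position whose original value equals the tuple's source, so the first tuple writes
-- last and wins — no per-element `in`/`.index` scan. Both A and B mutate
-- `current_numbers` in place in Python and return it; the theorem is about the value.

-- ===== PORT A =====
def find_matching_tuples (tuple_list : List (Int × Int)) (current_numbers : List Int) : List Int :=
  let source_mappings := tuple_list.map (fun values => values.1)
  let destination_mappings := tuple_list.map (fun values => values.2)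
  -- found_pairs starts as current_numbers (aliasing in Python); enumerate reads the
  -- original values because each iteration only overwrites its own index.
  (PySem.List.enumerate current_numbers).foldl
    (fun found_pairs p =>
      if p.2 ∈ source_mappings then
        match PySem.List.index? source_mappings p.2 with
        | some num_index =>
            PySem.List.pySetD found_pairs p.1
              (PySem.List.pyGetD destination_mappings (num_index : Int) 0)
        | none => found_pairs
      else found_pairs)
    current_numbers

-- ===== PORT B =====
def find_matching_tuples_alt (tuple_list : List (Int × Int)) (current_numbers : List Int) : List Int :=
  let original := current_numbers
  tuple_list.reverse.foldl
    (fun cur t =>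
      (PySem.List.enumerate original).foldl
        (fun cur p => if p.2 = t.1 then PySem.List.pySetD cur p.1 t.2 else cur)
        cur)
    current_numbers

-- ===== PRECONDITION & SPEC =====
def Spec_find_matching_tuples (tuple_list : List (Int × Int)) (current_numbers : List Int) (out : List Int) : Prop := out = find_matching_tuples_alt tuple_list current_numbers
instance (tuple_list : List (Int × Int)) (current_numbers : List Int) (out : List Int) : Decidable (Spec_find_matching_tuples tuple_list current_numbers out) := by unfold Spec_find_matching_tuples; infer_instance

-- ===== CLAIM =====
def Claim_equal_find_matching_tuples : Prop := ∀ (tuple_list : List (Int × Int)) (current_numbers : List Int), Dom_find_matching_tuples tuple_list current_numbers → Spec_find_matching_tuples tuple_list current_numbers (find_matching_tuples tuple_list current_numbers)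

-- ===== LEMMAS AND PROOFS =====

-- first-match lookup: the destination of the first tuple whose source is x, else x.
def fmatch (tl : List (Int × Int)) (x : Int) : Int :=
  match tl with
  | [] => x
  | t :: tl => if x = t.1 then t.2 else fmatch tl x

-- A's loop: setting each index to a function of its own (original) value is a map.
theorem foldl_enumerate_set (cond : Int → Prop) [DecidablePred cond] (h : Int → Int) :
    ∀ (cn pre : List Int),
      (PySem.List.enumerate cn (pre.length : Int)).foldl
        (fun fp p => if cond p.2 then PySem.List.pySetD fp p.1 (h p.2) else fp)
        (pre ++ cn)
      = pre ++ cn.map (fun x => if cond x then h x else x) := by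
  intro cn
  induction cn with
  | nil => intro pre; simp [PySem.List.enumerate_nil]
  | cons x cn ih =>
    intro pre
    rw [PySem.List.enumerate_cons, List.foldl_cons]
    by_cases hc : cond x
    · have hset : PySem.List.pySetD (pre ++ x :: cn) (pre.length : Int) (h x)
          = pre ++ h x :: cn := by
        rw [PySem.List.pySetD_natCast]
        rw [List.set_append_right _ _ (Nat.le_refl _)]
        simp
      simp only [hc, if_pos]
      rw [hset]
      have := ih (pre ++ [h x])
      simpa [hc, List.append_assoc] using this
    · simp only [hc, if_neg, not_false_iff]
      have := ih (pre ++ [x])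
      simpa [hc, List.append_assoc] using this

-- A computed as a map over current_numbers.
theorem find_matching_tuples_eq_map (tl : List (Int × Int)) (cn : List Int) :
    find_matching_tuples tl cn
      = cn.map (fun x =>
          if x ∈ tl.map (fun v => v.1) then
            (tl.map (fun v => v.2)).getD (((PySem.List.index? (tl.map (fun v => v.1)) x).getD 0)) 0
          else x) := by
  unfold find_matching_tuples
  have hstep : (fun (fp : List Int) (p : Int × Int) =>
      if p.2 ∈ tl.map (fun v => v.1) then
        match PySem.List.index? (tl.map (fun v => v.1)) p.2 with
        | some num_index =>
            PySem.List.pySetD fp p.1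
              (PySem.List.pyGetD (tl.map (fun v => v.2)) (num_index : Int) 0)
        | none => fp
      else fp)
     = (fun fp p =>
        if p.2 ∈ tl.map (fun v => v.1) then
          PySem.List.pySetD fp p.1
            ((tl.map (fun v => v.2)).getD ((PySem.List.index? (tl.map (fun v => v.1)) p.2).getD 0) 0)
        else fp) := by
    funext fp p
    by_cases hm : p.2 ∈ tl.map (fun v => v.1)
    · have : (PySem.List.index? (tl.map (fun v => v.1)) p.2).isSome := by
        rw [PySem.List.index?_isSome_iff]; exact hm
      obtain ⟨ni, hni⟩ := Option.isSome_iff_exists.mp this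
      simp only [hm, if_pos, hni]
      simp [PySem.List.pyGetD_natCast]
    · simp [hm]
  rw [show (have source_mappings := tl.map (fun values => values.1);
    have destination_mappings := tl.map (fun values => values.2);
    (PySem.List.enumerate cn).foldl
      (fun found_pairs p =>
        if p.2 ∈ source_mappings then
          match PySem.List.index? source_mappings p.2 with
          | some num_index =>
              PySem.List.pySetD found_pairs p.1
                (PySem.List.pyGetD destination_mappings (num_index : Int) 0)
          | none => found_pairs
        else found_pairs)
      cn : List Int) = ((PySem.List.enumerate cn).foldl
      (fun found_pairs p =>
        if p.2 ∈ tl.map (fun v => v.1) then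
          match PySem.List.index? (tl.map (fun v => v.1)) p.2 with
          | some num_index =>
              PySem.List.pySetD found_pairs p.1
                (PySem.List.pyGetD (tl.map (fun v => v.2)) (num_index : Int) 0)
          | none => found_pairs
        else found_pairs)
      cn : List Int) from rfl]
  rw [hstep]
  have := foldl_enumerate_set (fun x => x ∈ tl.map (fun v => v.1))
    (fun x => (tl.map (fun v => v.2)).getD ((PySem.List.index? (tl.map (fun v => v.1)) x).getD 0) 0)
    cn []
  simpa using this

-- fmatch returns its argument when no tuple's source matches.
theorem fmatch_not_mem : ∀ (tl : List (Int × Int)) (x : Int),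
    x ∉ tl.map (fun v => v.1) → fmatch tl x = x := by
  intro tl
  induction tl with
  | nil => intro x _; simp [fmatch]
  | cons t tl ih =>
    intro x hx
    simp only [List.map_cons, List.mem_cons, not_or] at hx
    simp [fmatch, hx.1, ih x hx.2]

-- A's positional first-match body is exactly fmatch.
theorem a_body_eq_fmatch : ∀ (tl : List (Int × Int)) (x : Int),
    (if x ∈ tl.map (fun v => v.1) then
       (tl.map (fun v => v.2)).getD (((PySem.List.index? (tl.map (fun v => v.1)) x).getD 0)) 0
     else x) = fmatch tl x := by
  intro tl
  induction tl with
  | nil => intro x; simp [fmatch]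
  | cons t tl ih =>
    intro x
    by_cases hx : x = t.1
    · subst hx
      have h0 : PySem.List.index? (t.1 :: tl.map (fun v => v.1)) t.1 = some 0 :=
        PySem.List.index?_cons_self _ _
      rw [List.map_cons, if_pos (by simp : t.1 ∈ t.1 :: tl.map (fun v => v.1)),
        List.map_cons, h0]
      simp [fmatch]
    · have hi : PySem.List.index? (t.1 :: tl.map (fun v => v.1)) x
          = (PySem.List.index? (tl.map (fun v => v.1)) x).map (· + 1) :=
        PySem.List.index?_cons_of_ne _ (Ne.symm hx)
      by_cases hm : x ∈ tl.map (fun v => v.1)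
      · have : (PySem.List.index? (tl.map (fun v => v.1)) x).isSome := by
          rw [PySem.List.index?_isSome_iff]; exact hm
        obtain ⟨ni, hni⟩ := Option.isSome_iff_exists.mp this
        have hih := ih x
        simp only [hm, if_pos, hni, Option.getD_some] at hih
        simp only [List.map_cons, List.mem_cons, hx, hm, or_true, if_pos, hi, hni,
          Option.map_some, Option.getD_some, List.getD_cons_succ, fmatch]
        exact hih
      · have hmem : x ∉ (t :: tl).map (fun v => v.1) := by
          simp [List.map_cons, hx, hm]
        rw [if_neg hmem]
        simp [fmatch, hx, fmatch_not_mem tl x hm]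

-- B's inner loop: overwriting every matching position of the original list is a zipWith.
theorem inner_loop_eq_zipWith (src dst : Int) :
    ∀ (orig cur pre : List Int), cur.length = orig.length →
      (PySem.List.enumerate orig (pre.length : Int)).foldl
        (fun c p => if p.2 = src then PySem.List.pySetD c p.1 dst else c)
        (pre ++ cur)
      = pre ++ orig.zipWith (fun n c => if n = src then dst else c) cur := by
  intro orig
  induction orig with
  | nil => intro cur pre h; simp_all [PySem.List.enumerate_nil, List.length_eq_zero_iff]
  | cons n orig ih =>
    intro cur pre h
    cases cur with
    | nil => simp at h
    | cons c cur =>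
      rw [PySem.List.enumerate_cons, List.foldl_cons]
      by_cases hc : n = src
      · have hset : PySem.List.pySetD (pre ++ c :: cur) (pre.length : Int) dst
            = pre ++ dst :: cur := by
          rw [PySem.List.pySetD_natCast]
          rw [List.set_append_right _ _ (Nat.le_refl _)]
          simp
        simp only [hc, if_pos]
        rw [hset]
        have := ih cur (pre ++ [dst]) (by simpa using h)
        simpa [hc, List.append_assoc] using this
      · simp only [hc, if_neg, not_false_iff]
        have := ih cur (pre ++ [c]) (by simpa using h)
        simpa [hc, List.append_assoc] using this

-- zipWith of a list with itself is a map.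
theorem zipWith_self (f : Int → Int → Int) : ∀ (l : List Int),
    List.zipWith f l l = l.map (fun a => f a a) := by
  intro l
  induction l with
  | nil => simp
  | cons a l ih => simp only [List.zipWith_cons_cons, List.map_cons, ih]

-- B's foldr over the tuples (outer loop reversed) computes the first-match map.
theorem foldr_inner_eq_map (cn : List Int) : ∀ (tl : List (Int × Int)),
    tl.foldr
      (fun t y =>
        (PySem.List.enumerate cn).foldl
          (fun cur p => if p.2 = t.1 then PySem.List.pySetD cur p.1 t.2 else cur) y)
      cn
    = cn.map (fmatch tl) := by
  intro tl
  induction tl with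
  | nil => simp [fmatch]
  | cons t tl ih =>
    rw [List.foldr_cons, ih]
    have := inner_loop_eq_zipWith t.1 t.2 cn (cn.map (fmatch tl)) [] (by simp)
    simp only [List.length_nil, Nat.cast_zero, List.nil_append] at this
    rw [this, List.zipWith_map_right, zipWith_self]
    apply List.map_congr_left
    intro x _
    simp [fmatch]

-- ===== VERDICT =====
theorem find_matching_tuples_spec : Claim_equal_find_matching_tuples := by
  intro tl cn _
  unfold Spec_find_matching_tuples
  rw [find_matching_tuples_eq_map]
  have hA := List.map_congr_left (l := cn)
    (f := fun x =>
      if x ∈ tl.map (fun v => v.1) then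
        (tl.map (fun v => v.2)).getD (((PySem.List.index? (tl.map (fun v => v.1)) x).getD 0)) 0
      else x)
    (g := fmatch tl) (fun x _ => a_body_eq_fmatch tl x)
  rw [hA]
  unfold find_matching_tuples_alt
  rw [List.foldl_reverse, foldr_inner_eq_map]
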